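-- pv_equiv track=rewrite | github.com/soumya-batra/officeqa_agentbeats | participant/src/retrieval.py | _expand_table_blocks
-- ===== SOURCE A (Python) =====
-- def _expand_table_blocks(content: str) -> list[str]:
--     lines = content.splitlines()
--     blocks: list[str] = []
--     index = 0
--     while index < len(lines):
--         if not lines[index].lstrip().startswith("|"):
--             index += 1
--             continue
--         start = max(0, index - 4)
--         end = index
--         while end < len(lines) and lines[end].lstrip().startswith("|"):
--             end += 1
--         block = "\n".join(lines[start : min(len(lines), end + 4)]).strip()
--         if block:
--             blocks.append(block)
--         index = end
--     return blocks
-- ===== SOURCE B (Python) =====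
-- def _expand_table_blocks(content: str) -> list[str]:
--     lines = content.splitlines()
--     # Phase 1: collect (start, end) index ranges of maximal runs of table lines.
--     runs: list[tuple[int, int]] = []
--     cur = None
--     for i, line in enumerate(lines):
--         if line.lstrip().startswith("|"):
--             if cur is None:
--                 cur = i
--         else:
--             if cur is not None:
--                 runs.append((cur, i))
--                 cur = None
--     if cur is not None:
--         runs.append((cur, len(lines)))
--     # Phase 2: materialise each run with up to 4 lines of context on each side.
--     blocks: list[str] = []
--     for s, e in runs:
--         block = "\n".join(lines[max(0, s - 4):min(len(lines), e + 4)]).strip()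
--         if block:
--             blocks.append(block)
--     return blocks
-- ===== Notes on version B (the rewrite author's own statement) =====
-- stated objective: alternative
-- what changed: A's single while-loop with an inline end-advancing inner loop is replaced by two separate phases: one linear state-machine pass that collects the (start, end) ranges of maximal table-line runs, then a second pass that materialises each run's clamped 4-line context window.
import Mathlib
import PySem

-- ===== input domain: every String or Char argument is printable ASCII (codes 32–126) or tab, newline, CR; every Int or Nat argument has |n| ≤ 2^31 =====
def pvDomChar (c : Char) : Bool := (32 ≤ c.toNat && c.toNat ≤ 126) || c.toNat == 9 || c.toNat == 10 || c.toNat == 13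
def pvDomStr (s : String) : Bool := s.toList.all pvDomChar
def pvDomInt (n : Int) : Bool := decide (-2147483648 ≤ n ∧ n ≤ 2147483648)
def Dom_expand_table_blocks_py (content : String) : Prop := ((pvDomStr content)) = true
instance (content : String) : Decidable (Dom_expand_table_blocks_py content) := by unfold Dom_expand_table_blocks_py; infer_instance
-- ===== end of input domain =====

-- B replaces A's nested end-advancing loop with a single state-machine pass collecting
-- (start, end) runs first, then a separate pass materialising the context windows (objective: simpler decomposition, same cost).

-- ===== PORT A =====

-- lines[index].lstrip().startswith("|")
def pvIsTabA (l : String) : Bool := PySem.Str.startswith (PySem.Str.lstrip l) "|"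

-- inner while: 'while end < len(lines) and lines[end].lstrip().startswith("|"): end += 1'
def pvAdvanceA (lines : List String) (e : Nat) : Nat :=
  if h : e < lines.length then
    if pvIsTabA lines[e] then pvAdvanceA lines (e + 1) else e
  else e
termination_by lines.length - e

theorem pvAdvanceA_of_tab (lines : List String) (e : Nat) (h : e < lines.length)
    (ht : pvIsTabA lines[e] = true) : pvAdvanceA lines e = pvAdvanceA lines (e + 1) := by
  rw [pvAdvanceA]; simp [h, ht]

theorem pvAdvanceA_of_not_tab (lines : List String) (e : Nat) (h : e < lines.length)
    (ht : pvIsTabA lines[e] = false) : pvAdvanceA lines e = e := by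
  rw [pvAdvanceA]; simp [h, ht]

theorem pvAdvanceA_of_ge (lines : List String) (e : Nat) (h : lines.length ≤ e) :
    pvAdvanceA lines e = e := by
  rw [pvAdvanceA]; simp [Nat.not_lt.mpr h]

theorem pvAdvanceA_ge (lines : List String) : ∀ e, e ≤ pvAdvanceA lines e := by
  have key : ∀ n e, lines.length - e ≤ n → e ≤ pvAdvanceA lines e := by
    intro n
    induction n with
    | zero => intro e he; rw [pvAdvanceA_of_ge lines e (by omega)]
    | succ n ih =>
        intro e he
        by_cases h : e < lines.length
        · by_cases ht : pvIsTabA lines[e] = true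
          · rw [pvAdvanceA_of_tab lines e h ht]
            have := ih (e + 1) (by omega); omega
          · rw [pvAdvanceA_of_not_tab lines e h (by simpa using ht)]
        · rw [pvAdvanceA_of_ge lines e (by omega)]
  intro e; exact key (lines.length - e) e le_rfl

theorem pvAdvanceA_gt (lines : List String) (e : Nat) (h : e < lines.length)
    (ht : pvIsTabA lines[e] = true) : e < pvAdvanceA lines e := by
  rw [pvAdvanceA]; simp only [h, dif_pos, ht, if_pos]
  exact Nat.lt_of_lt_of_le (Nat.lt_succ_self e) (pvAdvanceA_ge lines (e + 1))

-- block = "\n".join(lines[start : min(len(lines), end + 4)]).strip()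
def pvBlockA (lines : List String) (i e : Nat) : String :=
  PySem.Str.strip (PySem.Str.join "\n"
    (PySem.List.slice lines (some (max 0 ((i : Int) - 4)))
      (some (min (lines.length : Int) ((e : Int) + 4)))))

-- outer while over index
def pvLoopA (lines : List String) (i : Nat) : List String :=
  if h : i < lines.length then
    if ht : pvIsTabA lines[i] = false then pvLoopA lines (i + 1)
    else
      let e := pvAdvanceA lines i
      let block := pvBlockA lines i e
      (if block ≠ "" then [block] else []) ++ pvLoopA lines e
  else []
termination_by lines.length - i
decreasing_by
  · omega
  · have := pvAdvanceA_gt lines i h (by simpa using ht); omega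

def expand_table_blocks_py (content : String) : List String :=
  pvLoopA (PySem.Str.splitlines content) 0

-- ===== PORT B =====

def pvIsTabB (l : String) : Bool := PySem.Str.startswith (PySem.Str.lstrip l) "|"

-- phase 1: 'for i, line in enumerate(lines): …' fold with current-run-start state, then flush
def pvRunsB : List String → Nat → List (Nat × Nat) → Option Nat → List (Nat × Nat)
  | [], i, runs, cur =>
      match cur with
      | some s => runs ++ [(s, i)]
      | none => runs
  | l :: rest, i, runs, cur =>
      if pvIsTabB l then
        pvRunsB rest (i + 1) runs (some (cur.getD i))
      else
        match cur with
        | some s => pvRunsB rest (i + 1) (runs ++ [(s, i)]) none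
        | none => pvRunsB rest (i + 1) runs none

-- block = "\n".join(lines[max(0, s - 4) : min(len(lines), e + 4)]).strip()
def pvBlockB (lines : List String) (r : Nat × Nat) : String :=
  PySem.Str.strip (PySem.Str.join "\n"
    (PySem.List.slice lines (some (max 0 ((r.1 : Int) - 4)))
      (some (min (lines.length : Int) ((r.2 : Int) + 4)))))

-- phase 2: materialise the runs, skipping empty blocks
def pvBlocksB (lines : List String) : List (Nat × Nat) → List String → List String
  | [], blocks => blocks
  | r :: rest, blocks =>
      let b := pvBlockB lines r
      pvBlocksB lines rest (if b ≠ "" then blocks ++ [b] else blocks)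

def expand_table_blocks_py_alt (content : String) : List String :=
  pvBlocksB (PySem.Str.splitlines content)
    (pvRunsB (PySem.Str.splitlines content) 0 [] none) []

-- ===== PRECONDITION & SPEC =====
def Spec_expand_table_blocks_py (content : String) (out : List String) : Prop := out = expand_table_blocks_py_alt content
instance (content : String) (out : List String) : Decidable (Spec_expand_table_blocks_py content out) := by unfold Spec_expand_table_blocks_py; infer_instance

-- ===== CLAIM (what is proved, stated in full; the proofs are below) =====
def Claim_equal_expand_table_blocks_py : Prop := ∀ (content : String), Dom_expand_table_blocks_py content → Spec_expand_table_blocks_py content (expand_table_blocks_py content)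

-- ===== LEMMAS AND PROOFS =====

theorem pvIsTab_eq (l : String) : pvIsTabB l = pvIsTabA l := rfl

theorem pvBlock_eq (lines : List String) (i e : Nat) :
    pvBlockB lines (i, e) = pvBlockA lines i e := rfl

-- the canonical run list from index i: the maximal table-line runs of lines at or after i
def pvRunsSpec (lines : List String) (i : Nat) : List (Nat × Nat) :=
  if h : i < lines.length then
    if ht : pvIsTabA lines[i] = true then
      (i, pvAdvanceA lines i) :: pvRunsSpec lines (pvAdvanceA lines i)
    else pvRunsSpec lines (i + 1)
  else []
termination_by lines.length - i
decreasing_by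
  · have := pvAdvanceA_gt lines i h ht; omega
  · omega

theorem pvRunsSpec_of_tab (lines : List String) (i : Nat) (h : i < lines.length)
    (ht : pvIsTabA lines[i] = true) :
    pvRunsSpec lines i = (i, pvAdvanceA lines i) :: pvRunsSpec lines (pvAdvanceA lines i) := by
  rw [pvRunsSpec]; simp [h, ht]

theorem pvRunsSpec_of_not_tab (lines : List String) (i : Nat) (h : i < lines.length)
    (ht : pvIsTabA lines[i] = false) : pvRunsSpec lines i = pvRunsSpec lines (i + 1) := by
  rw [pvRunsSpec]; simp [h, ht]

theorem pvRunsSpec_of_ge (lines : List String) (i : Nat) (h : lines.length ≤ i) :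
    pvRunsSpec lines i = [] := by
  rw [pvRunsSpec]; simp [Nat.not_lt.mpr h]

-- cons-form materialiser
def pvBlocksRec (lines : List String) : List (Nat × Nat) → List String
  | [] => []
  | r :: rest =>
      (if pvBlockB lines r ≠ "" then [pvBlockB lines r] else []) ++ pvBlocksRec lines rest

theorem pvBlocksB_eq (lines : List String) :
    ∀ (rs : List (Nat × Nat)) (acc : List String),
      pvBlocksB lines rs acc = acc ++ pvBlocksRec lines rs := by
  intro rs
  induction rs with
  | nil => intro acc; simp [pvBlocksB, pvBlocksRec]
  | cons r rest ih =>
      intro acc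
      simp only [pvBlocksB, pvBlocksRec, ih]
      split_ifs <;> simp

theorem pvLoopA_of_not_tab (lines : List String) (i : Nat) (h : i < lines.length)
    (ht : pvIsTabA lines[i] = false) : pvLoopA lines i = pvLoopA lines (i + 1) := by
  rw [pvLoopA]; simp [h, ht]

theorem pvLoopA_of_tab (lines : List String) (i : Nat) (h : i < lines.length)
    (ht : pvIsTabA lines[i] = true) :
    pvLoopA lines i = (if pvBlockA lines i (pvAdvanceA lines i) ≠ "" then
        [pvBlockA lines i (pvAdvanceA lines i)] else []) ++ pvLoopA lines (pvAdvanceA lines i) := by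
  rw [pvLoopA]; simp [h, ht]

theorem pvLoopA_of_ge (lines : List String) (i : Nat) (h : lines.length ≤ i) :
    pvLoopA lines i = [] := by
  rw [pvLoopA]; simp [Nat.not_lt.mpr h]

-- A's loop computes the materialisation of the canonical run list
theorem pvLoopA_eq (lines : List String) : ∀ i,
    pvLoopA lines i = pvBlocksRec lines (pvRunsSpec lines i) := by
  have key : ∀ n i, lines.length - i ≤ n →
      pvLoopA lines i = pvBlocksRec lines (pvRunsSpec lines i) := by
    intro n
    induction n with
    | zero =>
        intro i he
        rw [pvLoopA_of_ge lines i (by omega), pvRunsSpec_of_ge lines i (by omega), pvBlocksRec]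
    | succ n ih =>
        intro i he
        by_cases h : i < lines.length
        · by_cases ht : pvIsTabA lines[i] = true
          · have hgt := pvAdvanceA_gt lines i h ht
            rw [pvLoopA_of_tab lines i h ht, pvRunsSpec_of_tab lines i h ht, pvBlocksRec]
            rw [ih (pvAdvanceA lines i) (by omega)]
            rw [pvBlock_eq]
          · rw [pvLoopA_of_not_tab lines i h (by simpa using ht),
              pvRunsSpec_of_not_tab lines i h (by simpa using ht)]
            exact ih (i + 1) (by omega)
        · rw [pvLoopA_of_ge lines i (by omega), pvRunsSpec_of_ge lines i (by omega), pvBlocksRec]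
  intro i; exact key (lines.length - i) i le_rfl

-- B's single-pass state machine computes the canonical run list
theorem pvRunsB_eq (lines : List String) :
    ∀ (n i : Nat) (acc : List (Nat × Nat)) (cur : Option Nat),
      n = lines.length - i → i ≤ lines.length →
      pvRunsB (lines.drop i) i acc cur =
        acc ++ (match cur with
          | some s => (s, pvAdvanceA lines i) :: pvRunsSpec lines (pvAdvanceA lines i)
          | none => pvRunsSpec lines i) := by
  intro n
  induction n with
  | zero =>
      intro i acc cur hn hi
      have hlen : i = lines.length := by omega
      subst hlen
      rw [List.drop_length]
      simp only [pvRunsB]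
      rw [pvAdvanceA_of_ge lines lines.length le_rfl, pvRunsSpec_of_ge lines lines.length le_rfl]
      cases cur <;> simp
  | succ n ih =>
      intro i acc cur hn hi
      have hlt : i < lines.length := by omega
      rw [List.drop_eq_getElem_cons hlt]
      simp only [pvRunsB]
      by_cases ht : pvIsTabA lines[i] = true
      · rw [pvIsTab_eq, ht]
        simp only [if_pos]
        rw [ih (i + 1) acc (some (cur.getD i)) (by omega) (by omega)]
        rw [pvAdvanceA_of_tab lines i hlt ht]
        cases cur with
        | some s => dsimp only; simp
        | none =>
            dsimp only
            simp only [Option.getD_none]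
            rw [pvRunsSpec_of_tab lines i hlt ht, pvAdvanceA_of_tab lines i hlt ht]
      · have htf : pvIsTabA lines[i] = false := by simpa using ht
        rw [pvIsTab_eq, htf]
        simp only [Bool.false_eq_true, if_neg, not_false_iff]
        cases cur with
        | some s =>
            dsimp only
            rw [ih (i + 1) (acc ++ [(s, i)]) none (by omega) (by omega)]
            rw [pvAdvanceA_of_not_tab lines i hlt htf,
              pvRunsSpec_of_not_tab lines i hlt htf]
            simp
        | none =>
            dsimp only
            rw [ih (i + 1) acc none (by omega) (by omega)]
            rw [pvRunsSpec_of_not_tab lines i hlt htf]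

-- ===== VERDICT (by name: the statement is the Claim_ definition above) =====
theorem expand_table_blocks_py_spec : Claim_equal_expand_table_blocks_py := by
  intro content _
  unfold Spec_expand_table_blocks_py expand_table_blocks_py expand_table_blocks_py_alt
  have h := pvRunsB_eq (PySem.Str.splitlines content)
    ((PySem.Str.splitlines content).length - 0) 0 [] none rfl (Nat.zero_le _)
  simp only [List.drop_zero] at h
  rw [h, pvBlocksB_eq, pvLoopA_eq]
  simp
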